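-- pv_equiv track=rewrite | github.com/chmp/serde_arrow | serde_arrow/src/arrow2/gen_display_tests.py | split_existing_file
-- ===== SOURCE A (Python) =====
-- def split_existing_file(source):
--     header = []
--     footer = []
--
--     state = "in_header"
--
--     for line in source:
--         if state == "in_header":
--             header.append(line)
--
--             if line.strip() == "//# start tests":
--                 state = "in_tests"
--
--         elif state == "in_tests":
--             if line.strip() == "//# end tests":
--                 footer.append(line)
--                 state = "in_footer"
--
--         elif state == "in_footer":
--             footer.append(line)
--
--         else:
--             raise ValueError(f"Unknown state: {state}")
--
--     return header, footer
-- ===== SOURCE B (Python) =====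
-- def split_existing_file(source):
--     lines = list(source)
--     start = next((i for i, line in enumerate(lines)
--                   if line.strip() == "//# start tests"), None)
--     if start is None:
--         return lines, []
--     rest = lines[start + 1:]
--     end = next((j for j, line in enumerate(rest)
--                 if line.strip() == "//# end tests"), None)
--     if end is None:
--         return lines[:start + 1], []
--     return lines[:start + 1], rest[end:]
-- ===== Notes on version B (the rewrite author's own statement) =====
-- stated objective: simpler
-- what changed: Replaces the state-machine accumulation loop by finding the two marker indices and slicing the list around them.
import Mathlib
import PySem

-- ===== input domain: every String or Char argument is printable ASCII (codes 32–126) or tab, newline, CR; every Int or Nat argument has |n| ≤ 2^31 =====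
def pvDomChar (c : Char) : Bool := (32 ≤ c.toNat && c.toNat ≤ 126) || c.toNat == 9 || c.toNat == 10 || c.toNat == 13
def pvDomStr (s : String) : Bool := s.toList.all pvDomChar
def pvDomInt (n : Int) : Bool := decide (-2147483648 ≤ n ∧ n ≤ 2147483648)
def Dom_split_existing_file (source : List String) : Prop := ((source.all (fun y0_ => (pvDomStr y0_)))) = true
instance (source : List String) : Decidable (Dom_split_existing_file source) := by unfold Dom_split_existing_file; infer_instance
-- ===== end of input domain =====

-- B replaces A's state-machine accumulation by finding the two marker indices and slicing (objective: simpler).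

-- ===== PORT A =====
-- A: state machine over the lines; the unreachable `else: raise` branch of A cannot fire
-- (state only ever holds the three known values), so the final else covers "in_footer".
def splitGo (lines : List String) (header footer : List String) (state : String) :
    List String × List String :=
  match lines with
  | [] => (header, footer)
  | line :: rest =>
    if state == "in_header" then
      let header := header ++ [line]
      if PySem.Str.strip line == "//# start tests" then
        splitGo rest header footer "in_tests"
      else
        splitGo rest header footer state
    else if state == "in_tests" then
      if PySem.Str.strip line == "//# end tests" then
        splitGo rest header (footer ++ [line]) "in_footer"
      else
        splitGo rest header footer state
    else
      splitGo rest header (footer ++ [line]) state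

def split_existing_file (source : List String) : List String × List String :=
  splitGo source [] [] "in_header"

-- ===== PORT B =====
-- B: find the first start-marker index, slice the header; find the first end-marker
-- index in the remainder, slice the footer.
def split_existing_file_alt (source : List String) : List String × List String :=
  match source.findIdx? (fun line => PySem.Str.strip line == "//# start tests") with
  | none => (source, [])
  | some i =>
    let rest := source.drop (i + 1)
    match rest.findIdx? (fun line => PySem.Str.strip line == "//# end tests") with
    | none => (source.take (i + 1), [])
    | some j => (source.take (i + 1), rest.drop j)

-- ===== PRECONDITION & SPEC =====
def Spec_split_existing_file (source : List String) (out : List String × List String) : Prop := out = split_existing_file_alt source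
instance (source : List String) (out : List String × List String) : Decidable (Spec_split_existing_file source out) := by unfold Spec_split_existing_file; infer_instance

-- ===== CLAIM (what is proved, stated in full; the proofs are below) =====
def Claim_equal_split_existing_file : Prop := ∀ (source : List String), Dom_split_existing_file source → Spec_split_existing_file source (split_existing_file source)

-- ===== LEMMAS AND PROOFS =====

theorem splitGo_footer (lines : List String) (h f : List String) :
    splitGo lines h f "in_footer" = (h, f ++ lines) := by
  induction lines generalizing f with
  | nil => simp [splitGo]
  | cons x xs ih => simp [splitGo, ih, List.append_assoc]

theorem splitGo_tests (lines : List String) (h f : List String) :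
    splitGo lines h f "in_tests" =
      (h, f ++ (match lines.findIdx? (fun line => PySem.Str.strip line == "//# end tests") with
                | none => []
                | some j => lines.drop j)) := by
  induction lines generalizing f with
  | nil => simp [splitGo]
  | cons x xs ih =>
    by_cases hx : PySem.Str.strip x == "//# end tests"
    · simp [splitGo, hx, splitGo_footer, List.findIdx?_cons, List.append_assoc]
    · simp only [splitGo, List.findIdx?_cons, hx, if_neg, Bool.false_eq_true, not_false_iff,
        reduceIte, String.reduceBEq, ih]
      cases hfi : xs.findIdx? (fun line => PySem.Str.strip line == "//# end tests") <;>
        simp [hfi]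

theorem splitGo_header (lines : List String) (h f : List String) :
    splitGo lines h f "in_header" =
      (match lines.findIdx? (fun line => PySem.Str.strip line == "//# start tests") with
       | none => (h ++ lines, f)
       | some i =>
         let rest := lines.drop (i + 1)
         match rest.findIdx? (fun line => PySem.Str.strip line == "//# end tests") with
         | none => (h ++ lines.take (i + 1), f)
         | some j => (h ++ lines.take (i + 1), f ++ rest.drop j)) := by
  induction lines generalizing h with
  | nil => simp [splitGo]
  | cons x xs ih =>
    by_cases hx : PySem.Str.strip x == "//# start tests"
    · simp only [splitGo, hx, if_pos, reduceIte, String.reduceBEq, splitGo_tests,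
        List.findIdx?_cons, List.drop_succ_cons, List.take_succ_cons, List.drop_zero]
      cases hfi : xs.findIdx? (fun line => PySem.Str.strip line == "//# end tests") <;>
        simp [hfi, List.append_assoc]
    · simp only [splitGo, List.findIdx?_cons, hx, Bool.false_eq_true, not_false_iff,
        reduceIte, String.reduceBEq, ih]
      cases hfi : xs.findIdx? (fun line => PySem.Str.strip line == "//# start tests") with
      | none => simp [hfi]
      | some i =>
        simp only [hfi, Option.map_some, List.drop_succ_cons, List.take_succ_cons,
          List.append_assoc]
        cases (xs.drop (i+1)).findIdx? (fun line => PySem.Str.strip line == "//# end tests") <;>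
          simp [List.append_assoc]

-- ===== VERDICT (by name: the statement is the Claim_ definition above) =====
theorem split_existing_file_spec : Claim_equal_split_existing_file := by
  intro source _
  show _ = _
  simp only [split_existing_file, split_existing_file_alt, splitGo_header, List.nil_append]
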